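-- pv_equiv track=rewrite | github.com/yxicun89/pythons | abc180.py | check_substring_match
-- ===== SOURCE A (Python) =====
-- def check_substring_match(S, T):
--     len_s = len(S)
--     len_t = len(T)
--
--     for w in range(1, len_s):
--         for c in range(1, w + 1):
--             constructed_string = ''
--             index = c - 1
--
--             while index < len_s:
--                 constructed_string += S[index]
--                 index += w
--                 if len(constructed_string) > len_t:
--                     break
--
--             if constructed_string == T:
--                 return "Yes"
--
--     return "No"
-- ===== SOURCE B (Python) =====
-- def check_substring_match(S, T):
--     n, m = len(S), len(T)
--     return "Yes" if any(
--         all(S[r + j * w] == T[j] for j in range(m))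
--         for w in range(1, n)
--         for r in range(max(0, n - m * w), min(w, n - (m - 1) * w))
--     ) else "No"
-- ===== Notes on version B (the rewrite author's own statement) =====
-- stated objective: faster
-- what changed: Instead of building every decimated string character by character with truncation, B derives for each stride w the closed-form residue interval whose class has length exactly len(T) and tests only those classes by direct index comparison with early exit (any/all generator expressions).
import Mathlib
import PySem

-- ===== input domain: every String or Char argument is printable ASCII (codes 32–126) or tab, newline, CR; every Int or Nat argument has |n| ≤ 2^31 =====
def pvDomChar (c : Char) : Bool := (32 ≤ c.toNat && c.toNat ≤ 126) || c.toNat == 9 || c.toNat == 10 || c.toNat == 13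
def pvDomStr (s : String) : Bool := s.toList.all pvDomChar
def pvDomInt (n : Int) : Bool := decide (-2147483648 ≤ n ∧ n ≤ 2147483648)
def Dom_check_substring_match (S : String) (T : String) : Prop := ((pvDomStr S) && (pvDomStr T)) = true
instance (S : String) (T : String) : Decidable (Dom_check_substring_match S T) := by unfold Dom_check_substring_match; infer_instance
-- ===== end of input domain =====

-- B tests, for each stride w, only the closed-form residue interval whose decimated class has
-- length exactly len(T), by direct index comparison (objective: faster, measured).

-- ===== PORT A =====
-- while index < len_s: constructed += S[index]; index += w; break if len > len_t
-- (fuel = len_s bounds the iteration count; the loop itself exits via s[index]? = none)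
def pvInnerA (s : List Char) (m w : Nat) : Nat → List Char → Nat → List Char
  | 0, acc, _ => acc
  | fuel+1, acc, index =>
    match s[index]? with
    | none => acc
    | some ch =>
      let acc' := acc ++ [ch]
      if m < acc'.length then acc'
      else pvInnerA s m w fuel acc' (index + w)

-- for c in range(1, w+1), counted down by k = number of remaining iterations
def pvLoopC (s t : List Char) (w : Nat) : Nat → Nat → Bool
  | _, 0 => false
  | c, k+1 =>
    if pvInnerA s t.length w s.length [] (c - 1) = t then true else pvLoopC s t w (c+1) k

-- for w in range(1, len_s)
def pvLoopW (s t : List Char) : Nat → Nat → Bool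
  | _, 0 => false
  | w, k+1 => if pvLoopC s t w 1 w then true else pvLoopW s t (w+1) k

def check_substring_match (S : String) (T : String) : String :=
  let s := S.toList
  let t := T.toList
  if pvLoopW s t 1 (s.length - 1) then "Yes" else "No"

-- ===== PORT B =====
-- all(S[r + j*w] == T[j] for j in range(m))  (indices are in range inside the residue interval)
def pvClassEq (s t : List Char) (w r : Nat) : Bool :=
  (List.range t.length).all (fun j => s[r + j * w]? == t[j]?)

-- any(... for w in range(1, n) for r in range(max(0, n - m*w), min(w, n - (m-1)*w)))
def check_substring_match_alt (S : String) (T : String) : String :=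
  let s := S.toList
  let t := T.toList
  let n := s.length
  let m := t.length
  if (List.range (n - 1)).any (fun i =>
      let w := i + 1
      let lo : Int := max 0 ((n : Int) - (m : Int) * (w : Int))
      let hi : Int := min (w : Int) ((n : Int) - ((m : Int) - 1) * (w : Int))
      (List.range (hi - lo).toNat).any (fun d => pvClassEq s t w (lo.toNat + d)))
  then "Yes" else "No"

-- ===== PRECONDITION & SPEC =====
def Spec_check_substring_match (S : String) (T : String) (out : String) : Prop := out = check_substring_match_alt S T
instance (S : String) (T : String) (out : String) : Decidable (Spec_check_substring_match S T out) := by unfold Spec_check_substring_match; infer_instance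

-- ===== CLAIM (what is proved, stated in full; the proofs are below) =====
def Claim_equal_check_substring_match : Prop := ∀ (S : String) (T : String), Dom_check_substring_match S T → Spec_check_substring_match S T (check_substring_match S T)

-- ===== LEMMAS AND PROOFS =====

-- proof-side model of one decimated class S[r::w] (fuel-bounded, exit via s[r]? = none)
def pvDecim (s : List Char) (w : Nat) : Nat → Nat → List Char
  | 0, _ => []
  | fuel+1, r =>
    match s[r]? with
    | none => []
    | some ch => ch :: pvDecim s w fuel (r + w)

theorem bool_eq_of_iff {a b : Bool} (h : a = true ↔ b = true) : a = b := by
  cases a <;> cases b <;> simp_all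

-- A's inner while-loop builds acc ++ (the class, truncated to m+1-acc.length chars)
theorem innerA_eq (s : List Char) (m w : Nat) :
    ∀ fuel r acc, acc.length ≤ m →
      pvInnerA s m w fuel acc r = acc ++ (pvDecim s w fuel r).take (m + 1 - acc.length) := by
  intro fuel
  induction fuel with
  | zero => intro r acc _; simp [pvInnerA, pvDecim]
  | succ fuel ih =>
    intro r acc hacc
    by_cases hr : r < s.length
    · have hg : s[r]? = some s[r] := List.getElem?_eq_getElem hr
      by_cases hm : acc.length = m
      · simp [pvInnerA, pvDecim, hg, hm]
      · have hlt : acc.length < m := lt_of_le_of_ne hacc hm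
        have : ¬ (m < (acc ++ [s[r]]).length) := by simp; omega
        simp only [pvInnerA, pvDecim, hg, this]
        rw [ih (r + w) (acc ++ [s[r]]) (by simp; omega)]
        have h1 : m + 1 - acc.length = (m + 1 - (acc ++ [s[r]]).length) + 1 := by simp; omega
        rw [h1]
        simp [List.take_succ_cons]
    · have hg : s[r]? = none := List.getElem?_eq_none (by omega)
      simp [pvInnerA, pvDecim, hg]

-- truncating to len(t)+1 chars does not change equality with t
theorem take_eq_iff (d t : List Char) : d.take (t.length + 1) = t ↔ d = t := by
  constructor
  · intro h
    have hl := congrArg List.length h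
    simp [List.length_take] at hl
    have hd : d.length ≤ t.length + 1 := by omega
    rw [List.take_of_length_le hd] at h
    exact h
  · intro h
    subst h
    exact List.take_of_length_le (by omega)

theorem innerA_eq_t (s t : List Char) (w r : Nat) :
    pvInnerA s t.length w s.length [] r = t ↔ pvDecim s w s.length r = t := by
  rw [innerA_eq s t.length w s.length r [] (by simp)]
  simp only [List.nil_append, List.length_nil, Nat.sub_zero]
  exact take_eq_iff _ t

theorem loopC_iff (s t : List Char) (w : Nat) :
    ∀ k c, pvLoopC s t w c k = true ↔ ∃ j < k, pvInnerA s t.length w s.length [] (c + j - 1) = t := by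
  intro k
  induction k with
  | zero => intro c; simp [pvLoopC]
  | succ k ih =>
    intro c
    simp only [pvLoopC]
    by_cases h : pvInnerA s t.length w s.length [] (c - 1) = t
    · simp only [h]
      constructor
      · intro _; exact ⟨0, by omega, by simpa using h⟩
      · intro _; rfl
    · rw [if_neg h, ih (c + 1)]
      constructor
      · rintro ⟨j, hj, hp⟩
        exact ⟨j + 1, by omega, by convert hp using 2; omega⟩
      · rintro ⟨j, hj, hp⟩
        match j with
        | 0 => exact absurd (by simpa using hp) h
        | j+1 => exact ⟨j, by omega, by convert hp using 2; omega⟩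

-- length of the class starting at r with stride w: ceil((n-r)/w), as long as fuel suffices
theorem decim_length (s : List Char) (w : Nat) (hw : 0 < w) :
    ∀ fuel r, s.length ≤ fuel + r →
      (pvDecim s w fuel r).length = (s.length - r + (w - 1)) / w := by
  intro fuel
  induction fuel with
  | zero =>
    intro r h
    have : s.length - r = 0 := by omega
    simp [pvDecim, this, Nat.div_eq_of_lt (by omega : w - 1 < w)]
  | succ fuel ih =>
    intro r h
    by_cases hr : r < s.length
    · have hg : s[r]? = some s[r] := List.getElem?_eq_getElem hr
      simp only [pvDecim, hg, List.length_cons]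
      rw [ih (r + w) (by omega)]
      have ha : 1 ≤ s.length - r := by omega
      have h1 : s.length - r + (w - 1) = (s.length - r - 1) + w := by omega
      rw [h1, Nat.add_div_right _ hw]
      congr 1
      by_cases hcase : w ≤ s.length - r
      · congr 1; omega
      · have e1 : s.length - (r + w) + (w - 1) = w - 1 := by omega
        rw [e1, Nat.div_eq_of_lt (by omega), Nat.div_eq_of_lt (by omega)]
    · have hg : s[r]? = none := List.getElem?_eq_none (by omega)
      have h0 : s.length - r = 0 := by omega
      simp [pvDecim, hg, h0, Nat.div_eq_of_lt (by omega : w - 1 < w)]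

-- element j of the class is S[r + j*w]
theorem decim_getElem (s : List Char) (w : Nat) :
    ∀ fuel r j, j < (pvDecim s w fuel r).length →
      (pvDecim s w fuel r)[j]? = s[r + j * w]? := by
  intro fuel
  induction fuel with
  | zero => intro r j hj; simp [pvDecim] at hj
  | succ fuel ih =>
    intro r j hj
    cases hg : s[r]? with
    | none => simp [pvDecim, hg] at hj
    | some ch =>
      simp only [pvDecim, hg] at hj ⊢
      cases j with
      | zero => simpa using hg.symm
      | succ j =>
        simp only [List.length_cons, Nat.add_lt_add_iff_right] at hj
        rw [List.getElem?_cons_succ, ih (r + w) j hj]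
        congr 1
        ring

-- pvClassEq unfolded to a pointwise statement
theorem classEq_iff (s t : List Char) (w r : Nat) :
    pvClassEq s t w r = true ↔ ∀ j < t.length, s[r + j * w]? = t[j]? := by
  simp [pvClassEq, List.all_eq_true, List.mem_range]

-- the class equals t exactly when all of t's indices match, provided r lies in the
-- residue interval (class length exactly t.length)
theorem decim_eq_iff_classEq (s t : List Char) (w r : Nat) (hw : 0 < w)
    (hlo : s.length ≤ r + t.length * w) (hhi : r + (t.length - 1) * w < s.length)
    (hm : 1 ≤ t.length) :
    pvDecim s w s.length r = t ↔ pvClassEq s t w r = true := by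
  have hlen : (pvDecim s w s.length r).length = t.length := by
    rw [decim_length s w hw s.length r (by omega)]
    have hmw : (t.length - 1) * w + w = t.length * w := by
      have : (t.length - 1) + 1 = t.length := by omega
      calc (t.length - 1) * w + w = ((t.length - 1) + 1) * w := by ring
        _ = t.length * w := by rw [this]
    have hrn : r < s.length := by omega
    apply Nat.div_eq_of_lt_le
    · calc t.length * w = (t.length - 1) * w + w := hmw.symm
        _ ≤ s.length - r - 1 + w := by omega
        _ ≤ s.length - r + (w - 1) := by omega
    · calc s.length - r + (w - 1) < t.length * w + w := by omega
        _ = (t.length + 1) * w := by ring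
  rw [classEq_iff]
  constructor
  · intro h j hj
    rw [← h, ← decim_getElem s w s.length r j (by rw [h]; exact hj)]
  · intro h
    apply List.ext_getElem?
    intro j
    by_cases hj : j < t.length
    · rw [decim_getElem s w s.length r j (by omega), h j hj]
    · rw [List.getElem?_eq_none (by omega), List.getElem?_eq_none (by omega)]

-- membership in B's residue interval, as four plain Nat conditions
theorem mem_interval_iff (n m w r : Nat) (hw : 0 < w) (hwn : w < n) :
    (∃ d < ((min (w : Int) ((n : Int) - ((m : Int) - 1) * (w : Int))) -
        max 0 ((n : Int) - (m : Int) * (w : Int))).toNat,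
      (max 0 ((n : Int) - (m : Int) * (w : Int))).toNat + d = r)
    ↔ (1 ≤ m ∧ r < w ∧ r + (m - 1) * w < n ∧ n ≤ r + m * w) := by
  rcases Nat.eq_zero_or_pos m with hm | hm
  · subst hm
    simp only [Nat.cast_zero, zero_mul, zero_sub, neg_mul, sub_neg_eq_add]
    constructor
    · rintro ⟨d, hd, _⟩
      exfalso
      simp at hd
      omega
    · omega
  · have hc1 : ((m : Int) - 1) = ((m - 1 : Nat) : Int) := by push_cast [hm]; omega
    rw [hc1, ← Nat.cast_mul, ← Nat.cast_mul]
    have hMM : m * w = (m - 1) * w + w := by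
      calc m * w = ((m - 1) + 1) * w := by congr 1; omega
        _ = (m - 1) * w + w := by ring
    generalize (m - 1) * w = K at hMM ⊢
    generalize m * w = M at hMM ⊢
    constructor
    · rintro ⟨d, hd, hr⟩; omega
    · rintro ⟨_, h1, h2, h3⟩
      exact ⟨r - (max 0 ((n : Int) - (M : Int))).toNat, by omega, by omega⟩

-- per stride w: A's scan over all residues ≡ B's scan over the closed-form interval
theorem perW (s t : List Char) (w : Nat) (hw : 0 < w) (hwn : w < s.length) :
    pvLoopC s t w 1 w =
      (List.range ((min (w : Int) ((s.length : Int) - ((t.length : Int) - 1) * (w : Int)) -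
          max 0 ((s.length : Int) - (t.length : Int) * (w : Int))).toNat)).any
        (fun d => pvClassEq s t w ((max 0 ((s.length : Int) - (t.length : Int) * (w : Int))).toNat + d)) := by
  apply bool_eq_of_iff
  rw [loopC_iff]
  simp only [List.any_eq_true, List.mem_range]
  constructor
  · rintro ⟨j, hj, hp⟩
    rw [show 1 + j - 1 = j from by omega, innerA_eq_t] at hp
    -- derive the interval conditions from the class length
    have hlen := congrArg List.length hp
    rw [decim_length s w hw s.length j (by omega)] at hlen
    have hjn : j < s.length := by omega
    have h1 : s.length - j + (w - 1) = (s.length - j - 1) + w := by omega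
    rw [h1, Nat.add_div_right _ hw] at hlen
    have hdm := Nat.div_add_mod (s.length - j - 1) w
    have hmod := Nat.mod_lt (s.length - j - 1) hw
    generalize hq : (s.length - j - 1) / w = q at hlen hdm
    have hm1 : 1 ≤ t.length := by omega
    have hq2 : q = t.length - 1 := by omega
    subst hq2
    have hcond : 1 ≤ t.length ∧ j < w ∧ j + (t.length - 1) * w < s.length ∧
        s.length ≤ j + t.length * w := by
      have hMM : t.length * w = (t.length - 1) * w + w := by
        calc t.length * w = ((t.length - 1) + 1) * w := by congr 1; omega
          _ = (t.length - 1) * w + w := by ring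
      have hqw : (t.length - 1) * w = w * (t.length - 1) := by ring
      constructor
      · exact hm1
      constructor
      · exact hj
      constructor
      · omega
      · omega
    obtain ⟨d, hd, hr⟩ := (mem_interval_iff s.length t.length w j hw hwn).mpr hcond
    refine ⟨d, hd, ?_⟩
    rw [hr]
    rw [← decim_eq_iff_classEq s t w j hw (by omega) (by omega) hcond.1]
    exact hp
  · rintro ⟨d, hd, hp⟩
    obtain ⟨hm1, hrw, hb1, hb2⟩ := (mem_interval_iff s.length t.length w
      ((max 0 ((s.length : Int) - (t.length : Int) * (w : Int))).toNat + d) hw hwn).mp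
      ⟨d, hd, rfl⟩
    set r := (max 0 ((s.length : Int) - (t.length : Int) * (w : Int))).toNat + d with hrdef
    have hdec : pvDecim s w s.length r = t :=
      (decim_eq_iff_classEq s t w r hw hb2 hb1 hm1).mpr hp
    refine ⟨r, hrw, ?_⟩
    rw [show 1 + r - 1 = r from by omega, innerA_eq_t]
    exact hdec

-- A's w-loop as an existential
theorem loopW_iff (s t : List Char) :
    ∀ k w, pvLoopW s t w k = true ↔ ∃ i < k, pvLoopC s t (w + i) 1 (w + i) = true := by
  intro k
  induction k with
  | zero => intro w; simp [pvLoopW]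
  | succ k ih =>
    intro w
    simp only [pvLoopW]
    by_cases h : pvLoopC s t w 1 w = true
    · simp only [h, if_true]
      constructor
      · intro _; exact ⟨0, by omega, by simpa using h⟩
      · intro _; trivial
    · rw [if_neg (by simp [h]), ih (w + 1)]
      constructor
      · rintro ⟨i, hi, hp⟩
        exact ⟨i + 1, by omega, by convert hp using 2 <;> omega⟩
      · rintro ⟨i, hi, hp⟩
        match i with
        | 0 => exact absurd (by simpa using hp) h
        | i+1 => exact ⟨i, by omega, by convert hp using 2 <;> omega⟩

-- ===== VERDICT (by name: the statement is the Claim_ definition above) =====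
theorem check_substring_match_spec : Claim_equal_check_substring_match := by
  intro S T _
  unfold Spec_check_substring_match check_substring_match check_substring_match_alt
  dsimp only
  congr 1
  apply propext
  rw [loopW_iff]
  simp only [List.any_eq_true, List.mem_range]
  constructor
  · rintro ⟨i, hi, hp⟩
    rw [Nat.add_comm 1 i, perW S.toList T.toList (i + 1) (by omega) (by omega)] at hp
    simp only [List.any_eq_true, List.mem_range] at hp
    exact ⟨i, hi, hp⟩
  · rintro ⟨i, hi, hp⟩
    refine ⟨i, hi, ?_⟩
    rw [Nat.add_comm 1 i, perW S.toList T.toList (i + 1) (by omega) (by omega)]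
    simp only [List.any_eq_true, List.mem_range]
    exact hp
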